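-- pv_equiv track=rewrite | github.com/Woleek/Scrambler-project | server.py | descram_V34
-- ===== SOURCE A (Python) =====
-- from operator import xor
--
-- def reverse_async_clock(frame, data, bit):
--     if bit[1] != -1:  # Checking whether we use both bits required for some scramblers
--         temp = xor(frame[bit[0] - 1], frame[bit[1] - 1])  # XOR for bit[0] and bit[1]
--     else:  # If there is only 1 bit, value is assigned to this bit
--         temp = frame[bit[0] - 1]
--     frame.pop()  # Remove the last bit from the frame
--     frame.insert(0, data)  # Adding a signalbit at the beginning of the frame
--     xor_value = xor(data, temp)  # XOR for the input synganle bit and the previous XOR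
--     return xor_value  # Return result of the coded signal
--
-- def descram_V34(bits):
--     data_length = len(bits)
--     frame_V34 = [1, 0, 0, 1, 0, 0, 0, 1, 0, 0, 1, 0, 0, 0, 0, 1, 0, 1, 0, 1, 1, 0, 1]  # Synchronization frame for scrambler
--     scram_bits = [18, 23]  # Bits used in feedback - for V34 bit 18 and 23
--     output_signal = []  # Array for output data
--     for i in range(0, data_length):
--         clock_result = reverse_async_clock(frame_V34, bits[i], scram_bits)  # Decoding operation
--         output_signal.append(clock_result)  # Add results to the output array
--     return output_signal
-- ===== SOURCE B (Python) =====
-- def descram_V34(bits):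
--     # Non-mutating re-implementation: the reversed initial frame supplies the
--     # "virtual past", so each output bit is computed by direct indexing.
--     frame_V34 = [1, 0, 0, 1, 0, 0, 0, 1, 0, 0, 1, 0, 0, 0, 0, 1, 0, 1, 0, 1, 1, 0, 1]
--     D = frame_V34[::-1] + list(bits)
--     return [bits[i] ^ (D[i + 5] ^ D[i]) for i in range(len(bits))]
-- ===== Notes on version B (the rewrite author's own statement) =====
-- stated objective: simpler
-- what changed: Replaces the mutating 23-bit shift register (pop/insert each step) with one precomputed extended array D = reversed(frame)+bits and a single comprehension output[i] = bits[i] ^ (D[i+5] ^ D[i]).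
import Mathlib
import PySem

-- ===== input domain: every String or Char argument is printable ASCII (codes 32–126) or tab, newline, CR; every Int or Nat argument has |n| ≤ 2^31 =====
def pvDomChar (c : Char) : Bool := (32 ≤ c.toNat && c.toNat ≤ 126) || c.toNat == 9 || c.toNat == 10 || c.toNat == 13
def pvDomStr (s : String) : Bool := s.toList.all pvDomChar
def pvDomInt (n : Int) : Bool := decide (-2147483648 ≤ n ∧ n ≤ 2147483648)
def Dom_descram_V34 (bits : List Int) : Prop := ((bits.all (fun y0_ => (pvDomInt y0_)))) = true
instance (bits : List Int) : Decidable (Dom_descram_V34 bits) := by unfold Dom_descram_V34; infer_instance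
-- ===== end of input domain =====

-- B replaces A's mutating 23-bit shift register with one precomputed extended
-- array D = reversed(frame) ++ bits and direct indexing (simpler, non-mutating).


-- ===== PORT A =====
-- returns (xor_value, mutated frame); frame always has 23 elements so the
-- pyGetD default is never used (indices 17 and 22 are in range)
def reverse_async_clock (frame : List Int) (data : Int) (bit : Int × Int) : Int × List Int :=
  let temp :=
    if bit.2 ≠ -1 then
      PySem.Int.bxor (PySem.List.pyGetD frame (bit.1 - 1) 0) (PySem.List.pyGetD frame (bit.2 - 1) 0)
    else PySem.List.pyGetD frame (bit.1 - 1) 0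
  let frame := frame.dropLast        -- frame.pop()
  let frame := data :: frame         -- frame.insert(0, data)
  (PySem.Int.bxor data temp, frame)

-- the for-loop over the bits, carrying the mutable frame and output_signal
def descram_V34_loop (frame : List Int) (bit : Int × Int) (bs : List Int) (out : List Int) : List Int :=
  match bs with
  | [] => out
  | b :: rest =>
    let r := reverse_async_clock frame b bit
    descram_V34_loop r.2 bit rest (out ++ [r.1])

def descram_V34 (bits : List Int) : List Int :=
  let frame_V34 : List Int := [1, 0, 0, 1, 0, 0, 0, 1, 0, 0, 1, 0, 0, 0, 0, 1, 0, 1, 0, 1, 1, 0, 1]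
  let scram_bits : Int × Int := (18, 23)
  descram_V34_loop frame_V34 scram_bits bits []

-- ===== PORT B =====
def descram_V34_alt (bits : List Int) : List Int :=
  let frame_V34 : List Int := [1, 0, 0, 1, 0, 0, 0, 1, 0, 0, 1, 0, 0, 0, 0, 1, 0, 1, 0, 1, 1, 0, 1]
  let D := frame_V34.reverse ++ bits
  (List.range bits.length).map (fun i =>
    PySem.Int.bxor (bits.getD i 0) (PySem.Int.bxor (D.getD (i + 5) 0) (D.getD i 0)))

-- ===== PRECONDITION & SPEC =====
def Spec_descram_V34 (bits : List Int) (out : List Int) : Prop := out = descram_V34_alt bits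
instance (bits : List Int) (out : List Int) : Decidable (Spec_descram_V34 bits out) := by unfold Spec_descram_V34; infer_instance

-- ===== CLAIM (what is proved, stated in full; the proofs are below) =====
def Claim_equal_descram_V34 : Prop := ∀ (bits : List Int), Dom_descram_V34 bits → Spec_descram_V34 bits (descram_V34 bits)

-- ===== LEMMAS AND PROOFS =====

-- the per-index output formula B uses, for an arbitrary current frame
def pvBody (frame bs : List Int) (i : Nat) : Int :=
  PySem.Int.bxor (bs.getD i 0)
    (PySem.Int.bxor ((frame.reverse ++ bs).getD (i + 5) 0) ((frame.reverse ++ bs).getD i 0))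

lemma pvBody_succ (frame : List Int) (h : frame.length = 23) (b : Int) (bs : List Int) (i : Nat) :
    pvBody frame (b :: bs) (i + 1) = pvBody (b :: frame.dropLast) bs i := by
  have hne : frame ≠ [] := by intro hc; simp [hc] at h
  have hsplit : frame.reverse ++ (b :: bs) =
      frame.getLast hne :: (frame.dropLast.reverse ++ (b :: bs)) := by
    conv_lhs => rw [← List.dropLast_concat_getLast hne]
    simp
  have hsplit2 : (b :: frame.dropLast).reverse ++ bs = frame.dropLast.reverse ++ (b :: bs) := by
    simp
  simp [pvBody, hsplit]

lemma pvBody_zero (frame : List Int) (h : frame.length = 23) (b : Int) (bs : List Int) :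
    pvBody frame (b :: bs) 0 =
      PySem.Int.bxor b (PySem.Int.bxor (frame.getD 17 0) (frame.getD 22 0)) := by
  have h5' : 5 < frame.reverse.length := by simp [h]
  have h0' : 0 < frame.reverse.length := by simp [h]
  have h5 : (frame.reverse ++ (b :: bs)).getD 5 0 = frame.getD 17 0 := by
    rw [List.getD_append _ _ _ _ h5', List.getD_eq_getElem _ _ h5',
        List.getD_eq_getElem _ _ (show (17:Nat) < frame.length by omega), List.getElem_reverse]
    congr 1; omega
  have h0 : (frame.reverse ++ (b :: bs)).getD 0 0 = frame.getD 22 0 := by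
    rw [List.getD_append _ _ _ _ h0', List.getD_eq_getElem _ _ h0',
        List.getD_eq_getElem _ _ (show (22:Nat) < frame.length by omega), List.getElem_reverse]
    congr 1; omega
  simp only [pvBody, Nat.zero_add, List.getD_cons_zero]
  rw [h5, h0]

lemma pyGetD_seventeen (frame : List Int) :
    PySem.List.pyGetD frame (17 : Int) 0 = frame[17]?.getD 0 := by
  rw [show (17:Int) = ((17:Nat):Int) by norm_num, PySem.List.pyGetD_natCast]
  simp [List.getD]

lemma pyGetD_twentytwo (frame : List Int) :
    PySem.List.pyGetD frame (22 : Int) 0 = frame[22]?.getD 0 := by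
  rw [show (22:Int) = ((22:Nat):Int) by norm_num, PySem.List.pyGetD_natCast]
  simp [List.getD]

lemma descram_V34_loop_eq (bs : List Int) :
    ∀ (frame out : List Int), frame.length = 23 →
      descram_V34_loop frame (18, 23) bs out =
        out ++ (List.range bs.length).map (pvBody frame bs) := by
  induction bs with
  | nil => intro frame out _; simp [descram_V34_loop]
  | cons b rest ih =>
    intro frame out h
    have hlen' : (b :: frame.dropLast).length = 23 := by
      simp [List.length_dropLast, h]
    have hhead : (reverse_async_clock frame b (18, 23)).1 = pvBody frame (b :: rest) 0 := by
      rw [pvBody_zero frame h]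
      simp [reverse_async_clock, pyGetD_seventeen frame, pyGetD_twentytwo frame]
    have hframe : (reverse_async_clock frame b (18, 23)).2 = b :: frame.dropLast := by
      simp [reverse_async_clock]
    rw [descram_V34_loop, hframe, hhead, ih _ _ hlen']
    rw [List.length_cons, List.range_succ_eq_map, List.map_cons, List.map_map]
    have hcomp : (pvBody frame (b :: rest)) ∘ Nat.succ = pvBody (b :: frame.dropLast) rest := by
      funext i
      simp [Function.comp, Nat.succ_eq_add_one, pvBody_succ frame h b rest i]
    rw [hcomp]
    simp

-- ===== VERDICT (by name: the statement is the Claim_ definition above) =====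
theorem descram_V34_spec : Claim_equal_descram_V34 := by
  intro bits _
  unfold Spec_descram_V34 descram_V34 descram_V34_alt
  rw [descram_V34_loop_eq bits _ [] (by decide)]
  simp [pvBody]
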